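-- pv_equiv track=rewrite | github.com/benaich04/FPGA_Telemetry | sim/test_viterbi_sequence.py | enc_7_5
-- ===== SOURCE A (Python) =====
-- def enc_7_5(u_bits):
--     # s = {s1,s0} = {u[k-2], u[k-1]}, start {0,0}; next = {s0, u}
--     s1, s0 = 0, 0
--     out = []
--     for u in u_bits:
--         v1 = u ^ s0 ^ s1  # 111
--         v0 = u ^ s1       # 101
--         out.append((v1, v0))
--         s1, s0 = s0, u
--     return out
-- ===== SOURCE B (Python) =====
-- def enc_7_5(u_bits):
--     # Tap-major convolution over GF(2): for each generator tap delay j,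
--     # XOR the input delayed by j into the output accumulators, then zip.
--     u = list(u_bits)
--     n = len(u)
--     v1 = [0] * n
--     v0 = [0] * n
--     for j in (0, 1, 2):        # taps of generator 111 (octal 7)
--         for k in range(j, n):
--             v1[k] ^= u[k - j]
--     for j in (0, 2):           # taps of generator 101 (octal 5)
--         for k in range(j, n):
--             v0[k] ^= u[k - j]
--     return list(zip(v1, v0))
-- ===== Notes on version B (the rewrite author's own statement) =====
-- stated objective: alternative
-- what changed: Replaces the per-bit shift-register state machine with tap-major convolution: the outer loop runs over the generator taps (111 and 101), each pass XOR-accumulating the j-delayed input into mutable output arrays, which are zipped at the end.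
import Mathlib
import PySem

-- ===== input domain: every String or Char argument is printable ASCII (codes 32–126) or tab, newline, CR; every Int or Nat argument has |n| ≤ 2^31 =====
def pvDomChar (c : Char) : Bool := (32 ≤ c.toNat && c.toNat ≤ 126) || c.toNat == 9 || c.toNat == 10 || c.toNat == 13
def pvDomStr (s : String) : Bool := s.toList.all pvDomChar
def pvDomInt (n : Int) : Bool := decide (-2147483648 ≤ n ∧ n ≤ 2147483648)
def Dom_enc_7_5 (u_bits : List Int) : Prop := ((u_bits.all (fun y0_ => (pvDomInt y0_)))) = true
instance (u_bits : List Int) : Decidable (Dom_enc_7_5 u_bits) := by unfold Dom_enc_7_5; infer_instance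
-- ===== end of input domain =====

-- B replaces A's per-bit shift-register state machine by tap-major convolution:
-- an outer loop over the generator taps XOR-accumulates delayed copies of the
-- input into mutable output arrays (objective: alternative decomposition, same cost).

-- ===== PORT A =====
-- for-loop over u_bits carrying state (s1, s0, out), appending one pair per bit
def enc_7_5 (u_bits : List Int) : List (Int × Int) :=
  (u_bits.foldl
    (fun (st : Int × Int × List (Int × Int)) u =>
      let s1 := st.1
      let s0 := st.2.1
      let out := st.2.2
      let v1 := PySem.Int.bxor (PySem.Int.bxor u s0) s1
      let v0 := PySem.Int.bxor u s1
      (s0, u, out ++ [(v1, v0)]))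
    (0, 0, [])).2.2

-- ===== PORT B =====
-- inner loop 'for k in range(j, n): v[k] ^= u[k - j]' of Source B; v always has length n,
-- 0 ≤ j, and every index k and k-j is in range, so range(j, n) = List.range' j (n-j)
-- and Python's list read/write are exactly getD/set here (no IndexError possible).
def encPass (u : List Int) (j : Nat) (v : List Int) : List Int :=
  (List.range' j (v.length - j)).foldl
    (fun w k => w.set k (PySem.Int.bxor (w.getD k 0) (u.getD (k - j) 0))) v

-- v1 = [0]*n then taps (0,1,2); v0 = [0]*n then taps (0,2); return list(zip(v1, v0))
def enc_7_5_alt (u_bits : List Int) : List (Int × Int) :=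
  let u := u_bits
  let n := u.length
  let v1 := [0, 1, 2].foldl (fun v j => encPass u j v) (List.replicate n 0)
  let v0 := [0, 2].foldl (fun v j => encPass u j v) (List.replicate n 0)
  List.zip v1 v0

-- ===== PRECONDITION & SPEC =====
def Spec_enc_7_5 (u_bits : List Int) (out : List (Int × Int)) : Prop := out = enc_7_5_alt u_bits
instance (u_bits : List Int) (out : List (Int × Int)) : Decidable (Spec_enc_7_5 u_bits out) := by unfold Spec_enc_7_5; infer_instance

-- ===== CLAIM (what is proved, stated in full; the proofs are below) =====
def Claim_equal_enc_7_5 : Prop := ∀ (u_bits : List Int), Dom_enc_7_5 u_bits → Spec_enc_7_5 u_bits (enc_7_5 u_bits)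

-- ===== LEMMAS AND PROOFS =====

-- A's loop invariant: with state (s1, s0) and accumulator acc, the remaining loop
-- produces acc followed by the per-position formula over (u, s0::u, s1::s0::u).
theorem enc_7_5_loop (u : List Int) :
    ∀ (s1 s0 : Int) (acc : List (Int × Int)),
    (u.foldl
      (fun (st : Int × Int × List (Int × Int)) u =>
        let s1 := st.1
        let s0 := st.2.1
        let out := st.2.2
        let v1 := PySem.Int.bxor (PySem.Int.bxor u s0) s1
        let v0 := PySem.Int.bxor u s1
        (s0, u, out ++ [(v1, v0)]))
      (s1, s0, acc)).2.2
    = acc ++ List.zipWith3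
        (fun a b c => (PySem.Int.bxor (PySem.Int.bxor a b) c, PySem.Int.bxor a c))
        u (s0 :: u) (s1 :: s0 :: u) := by
  induction u with
  | nil => intro s1 s0 acc; simp [List.zipWith3]
  | cons a t ih =>
      intro s1 s0 acc
      simp only [List.foldl_cons, List.zipWith3]
      rw [ih]
      simp

-- one tap pass, from position i on: writes w[k] ^= u[k-j] for k = i .. length-1
theorem encPass_go (u : List Int) (j : Nat) :
    ∀ (m i : Nat) (v : List Int), i + m = v.length → j ≤ i → v.length ≤ u.length + j →
    (List.range' i m).foldl
      (fun w k => w.set k (PySem.Int.bxor (w.getD k 0) (u.getD (k - j) 0))) v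
    = v.take i ++ List.zipWith PySem.Int.bxor (v.drop i) (u.drop (i - j)) := by
  intro m
  induction m with
  | zero =>
      intro i v h _ _
      have : v.drop i = [] := List.drop_eq_nil_of_le (by omega)
      simp [this, List.take_of_length_le (by omega : v.length ≤ i)]
  | succ m ih =>
      intro i v h hj hu
      have hi : i < v.length := by omega
      have hij : i - j < u.length := by omega
      rw [List.range'_succ, List.foldl_cons]
      rw [ih (i + 1) (v.set i (PySem.Int.bxor (v.getD i 0) (u.getD (i - j) 0)))
            (by simp; omega) (by omega) (by simp; omega)]
      have hset : v.set i (PySem.Int.bxor (v.getD i 0) (u.getD (i - j) 0))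
          = v.take i ++ PySem.Int.bxor v[i] u[i - j] :: v.drop (i + 1) := by
        rw [List.getD_eq_getElem v 0 hi, List.getD_eq_getElem u 0 hij,
          List.set_eq_take_append_cons_drop, if_pos hi]
      rw [hset]
      have hlen : (v.take i).length = i := by simp [hi.le]
      have h_take : (v.take i ++ PySem.Int.bxor v[i] u[i - j] :: v.drop (i + 1)).take (i + 1)
          = v.take i ++ [PySem.Int.bxor v[i] u[i - j]] := by
        rw [List.take_append, hlen,
          List.take_of_length_le (by omega : (v.take i).length ≤ i + 1)]
        norm_num
      have h_drop : (v.take i ++ PySem.Int.bxor v[i] u[i - j] :: v.drop (i + 1)).drop (i + 1)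
          = v.drop (i + 1) := by
        rw [List.drop_append, hlen,
          List.drop_of_length_le (by omega : (v.take i).length ≤ i + 1)]
        norm_num
      rw [h_take, h_drop]
      have h2 : i + 1 - j = (i - j) + 1 := by omega
      rw [h2, List.append_assoc, List.singleton_append,
        List.drop_eq_getElem_cons hi, List.drop_eq_getElem_cons hij,
        List.zipWith_cons_cons]

-- closed form of one full pass
theorem encPass_spec (u v : List Int) (j : Nat) (hj : j ≤ v.length)
    (hu : v.length ≤ u.length + j) :
    encPass u j v = v.take j ++ List.zipWith PySem.Int.bxor (v.drop j) u := by
  unfold encPass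
  rw [encPass_go u j (v.length - j) j v (by omega) le_rfl hu]
  simp

theorem zipWith_zero_left (u : List Int) :
    List.zipWith PySem.Int.bxor (List.replicate u.length 0) u = u := by
  induction u with
  | nil => simp
  | cons a t ih => simp [List.replicate_succ, ih, PySem.Int.bxor_comm]

-- core sliding equivalence, two elements peeled
theorem enc_core (t : List Int) :
    ∀ a b : Int,
    List.zip
      (List.zipWith PySem.Int.bxor (List.zipWith PySem.Int.bxor t (b :: t)) (a :: b :: t))
      (List.zipWith PySem.Int.bxor t (a :: b :: t))
    = List.zipWith3
        (fun x y z => (PySem.Int.bxor (PySem.Int.bxor x y) z, PySem.Int.bxor x z))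
        t (b :: t) (a :: b :: t) := by
  induction t with
  | nil => intro a b; simp [List.zipWith3]
  | cons c t ih =>
      intro a b
      simp only [List.zipWith_cons_cons, List.zip_cons_cons, List.zipWith3]
      rw [ih b c]

-- ===== VERDICT (by name: the statement is the Claim_ definition above) =====
theorem encPass_zero (u : List Int) : encPass u 0 (List.replicate u.length 0) = u := by
  rw [encPass_spec u (List.replicate u.length 0) 0 (by simp) (by simp)]
  simpa using zipWith_zero_left u

-- ===== VERDICT (by name: the statement is the Claim_ definition above) =====
theorem enc_7_5_spec : Claim_equal_enc_7_5 := by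
  intro u _
  show enc_7_5 u = enc_7_5_alt u
  have hA : enc_7_5 u
      = List.zipWith3
          (fun a b c => (PySem.Int.bxor (PySem.Int.bxor a b) c, PySem.Int.bxor a c))
          u (0 :: u) (0 :: 0 :: u) := by
    unfold enc_7_5
    simpa using enc_7_5_loop u 0 0 []
  rw [hA]
  cases u with
  | nil => simp [enc_7_5_alt, encPass, List.zipWith3]
  | cons a u' =>
    cases u' with
    | nil =>
        simp [enc_7_5_alt, encPass, List.zipWith3, PySem.Int.bxor_comm]
    | cons b t =>
        unfold enc_7_5_alt
        simp only [List.foldl_cons, List.foldl_nil]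
        rw [encPass_zero (a :: b :: t)]
        rw [encPass_spec (a :: b :: t) (a :: b :: t) 1 (by simp) (by simp)]
        simp only [List.take_succ_cons, List.take_zero, List.drop_succ_cons,
          List.drop_zero, List.zipWith_cons_cons, List.cons_append, List.nil_append]
        rw [encPass_spec (a :: b :: t)
              (a :: PySem.Int.bxor b a :: List.zipWith PySem.Int.bxor t (b :: t)) 2
              (by simp) (by simp)]
        rw [encPass_spec (a :: b :: t) (a :: b :: t) 2 (by simp) (by simp)]
        simp only [List.take_succ_cons, List.take_zero, List.drop_succ_cons,
          List.drop_zero, List.cons_append, List.nil_append, List.zip_cons_cons]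
        rw [enc_core t a b]
        simp [List.zipWith3]
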